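-- pv_equiv track=rewrite | github.com/2025-2-fundamentos/LAB-01-python-basico-Paulipupo | homework/pregunta_06.py | wordcount_reducer
-- ===== SOURCE A (Python) =====
-- def wordcount_reducer(mapped_data):
--     result = []
--     for key, value in mapped_data:
--         if result and result[-1][0] == key:
--             result[-1] = (key, min(result[-1][1], value), max(result[-1][2], value))
--         else:
--             result.append((key, value, value))
--
--     return result
-- ===== SOURCE B (Python) =====
-- def wordcount_reducer(mapped_data):
--     output = []
--     i, n = 0, len(mapped_data)
--     while i < n:
--         key = mapped_data[i][0]
--         j = i
--         while j < n and mapped_data[j][0] == key: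
--             j += 1
--         values = [v for _, v in mapped_data[i:j]]
--         output.append((key, min(values), max(values)))
--         i = j
--     return output
-- ===== Notes on version B (the rewrite author's own statement) =====
-- stated objective: alternative
-- what changed: A tracks and rewrites the last output tuple incrementally per element; B partitions the input into maximal runs of equal consecutive keys and aggregates each run's value list with min/max in one step.
import Mathlib
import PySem

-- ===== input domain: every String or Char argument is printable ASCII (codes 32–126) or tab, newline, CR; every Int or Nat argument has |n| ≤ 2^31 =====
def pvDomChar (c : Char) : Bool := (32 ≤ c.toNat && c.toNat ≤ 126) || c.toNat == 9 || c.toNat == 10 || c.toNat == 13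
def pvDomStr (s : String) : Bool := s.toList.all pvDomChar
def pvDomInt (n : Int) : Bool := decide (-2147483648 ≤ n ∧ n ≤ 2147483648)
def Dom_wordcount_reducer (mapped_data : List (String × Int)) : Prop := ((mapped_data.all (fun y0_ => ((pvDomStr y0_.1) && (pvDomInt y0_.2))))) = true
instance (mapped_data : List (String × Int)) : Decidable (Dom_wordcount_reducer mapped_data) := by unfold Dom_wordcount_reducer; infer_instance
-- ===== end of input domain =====

-- B replaces A's incremental rewrite of the last output tuple by a run-partition: find each
-- maximal run of equal consecutive keys, then aggregate its values with min/max (alternative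
-- decomposition, same cost).


-- ===== PORT A =====
-- one loop iteration of A: merge into result[-1] if same key, else append (key, value, value)
def pvStepA (res : List (String × Int × Int)) (kv : String × Int) : List (String × Int × Int) :=
  match res.getLast? with
  | some last =>
      if last.1 == kv.1 then
        res.dropLast ++ [(kv.1, min last.2.1 kv.2, max last.2.2 kv.2)]
      else
        res ++ [(kv.1, kv.2, kv.2)]
  | none => [(kv.1, kv.2, kv.2)]

def wordcount_reducer (mapped_data : List (String × Int)) : List (String × Int × Int) :=
  mapped_data.foldl pvStepA []

-- ===== PORT B =====
-- Source B: scan forward to the end of the current run of equal keys (the inner while),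
-- aggregate the run's values with min/max, continue after the run.
def wordcount_reducer_alt (mapped_data : List (String × Int)) : List (String × Int × Int) :=
  match mapped_data with
  | [] => []
  | (k, v) :: rest =>
      let run := rest.takeWhile (fun kv => kv.1 == k)
      let vs := run.map Prod.snd
      (k, vs.foldl min v, vs.foldl max v) ::
        wordcount_reducer_alt (rest.dropWhile (fun kv => kv.1 == k))
termination_by mapped_data.length
decreasing_by
  simp only [List.length_cons]
  exact Nat.lt_succ_of_le (List.length_dropWhile_le _ _)

-- ===== PRECONDITION & SPEC =====
def Spec_wordcount_reducer (mapped_data : List (String × Int)) (out : List (String × Int × Int)) : Prop := out = wordcount_reducer_alt mapped_data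
instance (mapped_data : List (String × Int)) (out : List (String × Int × Int)) : Decidable (Spec_wordcount_reducer mapped_data out) := by unfold Spec_wordcount_reducer; infer_instance

-- ===== CLAIM (what is proved, stated in full; the proofs are below) =====
def Claim_equal_wordcount_reducer : Prop := ∀ (mapped_data : List (String × Int)), Dom_wordcount_reducer mapped_data → Spec_wordcount_reducer mapped_data (wordcount_reducer mapped_data)

-- ===== LEMMAS AND PROOFS =====

-- pvStepA only looks at / rewrites the last element, so a prefix before it is inert.
theorem foldl_stepA_pre (l : List (String × Int)) :
    ∀ (pre : List (String × Int × Int)) (x : String × Int × Int),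
      List.foldl pvStepA (pre ++ [x]) l = pre ++ List.foldl pvStepA [x] l := by
  induction l with
  | nil => intro pre x; simp
  | cons kv t ih =>
      intro pre x
      by_cases h : x.1 == kv.1
      · have hs : pvStepA (pre ++ [x]) kv = pre ++ [(kv.1, min x.2.1 kv.2, max x.2.2 kv.2)] := by
          simp [pvStepA, h]
        have hs1 : pvStepA [x] kv = [(kv.1, min x.2.1 kv.2, max x.2.2 kv.2)] := by
          simp [pvStepA, h]
        simp only [List.foldl_cons, hs, hs1, ih]
      · have hs : pvStepA (pre ++ [x]) kv = (pre ++ [x]) ++ [(kv.1, kv.2, kv.2)] := by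
          simp [pvStepA, h]
        have hs1 : pvStepA [x] kv = [x] ++ [(kv.1, kv.2, kv.2)] := by
          simp [pvStepA, h]
        simp only [List.foldl_cons, hs, hs1]
        rw [ih (pre ++ [x]), ih [x], List.append_assoc]

-- running A's loop from a single accumulator tuple = B's run aggregation
theorem foldl_stepA_run (l : List (String × Int)) :
    ∀ (k : String) (lo hi : Int),
      List.foldl pvStepA [(k, lo, hi)] l =
        (k, ((l.takeWhile (fun kv => kv.1 == k)).map Prod.snd).foldl min lo,
            ((l.takeWhile (fun kv => kv.1 == k)).map Prod.snd).foldl max hi) ::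
          wordcount_reducer_alt (l.dropWhile (fun kv => kv.1 == k)) := by
  induction l with
  | nil => intro k lo hi; simp [wordcount_reducer_alt.eq_def]
  | cons kv t ih =>
      intro k lo hi
      obtain ⟨k', v'⟩ := kv
      by_cases h : (k', v').1 == k
      · have hs : pvStepA [(k, lo, hi)] (k', v') = [(k, min lo v', max hi v')] := by
          have hk : k' = k := by simpa using h
          simp [pvStepA, hk]
        simp only [List.foldl_cons, hs, ih, List.takeWhile_cons, List.dropWhile_cons, h,
          if_pos, List.map_cons, List.foldl_cons]
      · have hs : pvStepA [(k, lo, hi)] (k', v') = [(k, lo, hi)] ++ [(k', v', v')] := by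
          have hk : ¬ (k == k') := by
            simp only [beq_iff_eq] at h ⊢; exact fun e => h e.symm
          simp [pvStepA, hk]
        simp only [List.foldl_cons, hs, List.takeWhile_cons, List.dropWhile_cons, h]
        rw [foldl_stepA_pre t [(k, lo, hi)] (k', v', v'), ih k' v' v']
        conv_rhs => rw [wordcount_reducer_alt.eq_def]
        simp

-- ===== VERDICT (by name: the statement is the Claim_ definition above) =====
theorem wordcount_reducer_spec : Claim_equal_wordcount_reducer := by
  intro mapped_data _
  unfold Spec_wordcount_reducer
  match mapped_data with
  | [] => rw [wordcount_reducer_alt.eq_def]; rfl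
  | (k, v) :: rest =>
      show List.foldl pvStepA (pvStepA [] (k, v)) rest = _
      have h0 : pvStepA [] (k, v) = [(k, v, v)] := by simp [pvStepA]
      rw [h0, foldl_stepA_run rest k v v]
      conv_rhs => rw [wordcount_reducer_alt.eq_def]
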